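-- pv_equiv track=rewrite | github.com/parasiitism/AlgoDaily | codility/0-count_increasing_subsequences/main.py | f
-- ===== SOURCE A (Python) =====
-- def f(nums):
--     res = 0
--     count = 0
--     for i in range(1, len(nums)):
--         if nums[i] > nums[i-1]:
--             count += 1
--             res += count
--         else:
--             count = 0
--     return res
-- ===== SOURCE B (Python) =====
-- def f(nums):
--     # Staged, stateless decomposition: first compute the positions where the
--     # increasing run breaks, then sum a closed-form L*(L-1)//2 per run segment.
--     n = len(nums)
--     breaks = [0] + [i for i in range(1, n) if nums[i] <= nums[i - 1]] + [n]
--     return sum((b - a) * (b - a - 1) // 2 for a, b in zip(breaks, breaks[1:]))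
-- ===== Notes on version B (the rewrite author's own statement) =====
-- stated objective: alternative
-- what changed: B replaces A's stateful single pass (run counter incremented and added to the result at every step) by two stateless stages: a comprehension collecting the indices where the run breaks, then a sum of the closed-form L*(L-1)//2 over the gaps between consecutive break positions.
import Mathlib
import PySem

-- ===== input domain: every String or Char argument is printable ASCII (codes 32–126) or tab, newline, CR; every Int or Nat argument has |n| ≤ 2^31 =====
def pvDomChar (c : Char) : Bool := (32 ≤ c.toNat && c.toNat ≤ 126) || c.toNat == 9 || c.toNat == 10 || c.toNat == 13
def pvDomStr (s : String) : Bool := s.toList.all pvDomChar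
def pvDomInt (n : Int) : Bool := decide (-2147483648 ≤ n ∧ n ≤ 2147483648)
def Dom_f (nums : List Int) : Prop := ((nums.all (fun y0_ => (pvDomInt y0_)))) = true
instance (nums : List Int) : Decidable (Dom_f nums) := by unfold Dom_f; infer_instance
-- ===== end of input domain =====

-- B replaces A's stateful per-step accumulation by two stateless stages: collect run-break indices, then sum the closed form L*(L-1)//2 over gaps between consecutive breaks (objective: alternative).


-- ===== PORT A =====
def f (nums : List Int) : Int :=
  ((PySem.List.pyRange 1 (PySem.List.len nums) 1).foldl
    (fun (s : Int × Int) i =>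
      if PySem.List.pyGetD nums i 0 > PySem.List.pyGetD nums (i - 1) 0 then
        (s.1 + (s.2 + 1), s.2 + 1)
      else (s.1, 0)) (0, 0)).1

-- ===== PORT B =====
def f_alt (nums : List Int) : Int :=
  let n := PySem.List.len nums
  let breaks : List Int :=
    [0] ++ (PySem.List.pyRange 1 n 1).filter
      (fun i => decide (PySem.List.pyGetD nums i 0 ≤ PySem.List.pyGetD nums (i - 1) 0)) ++ [n]
  ((breaks.zip (PySem.List.slice breaks (some 1) none)).map
    (fun ab => PySem.Int.floordiv ((ab.2 - ab.1) * (ab.2 - ab.1 - 1)) 2)).foldl (· + ·) 0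

-- ===== PRECONDITION & SPEC =====
def Spec_f (nums : List Int) (out : Int) : Prop := out = f_alt nums
instance (nums : List Int) (out : Int) : Decidable (Spec_f nums out) := by unfold Spec_f; infer_instance

-- ===== CLAIM (what is proved, stated in full; the proofs are below) =====
def Claim_equal_f : Prop := ∀ (nums : List Int), Dom_f nums → Spec_f nums (f nums)

-- ===== LEMMAS AND PROOFS =====

-- triangular numbers, in the two shapes the two programs use
def tri (r : Int) : Int := PySem.Int.floordiv (r * (r + 1)) 2
def tri' (d : Int) : Int := PySem.Int.floordiv (d * (d - 1)) 2

theorem tri_zero : tri 0 = 0 := by decide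

theorem tri'_succ (r : Int) : tri' (r + 1) = tri r := by
  unfold tri tri'
  congr 1
  ring

theorem tri_succ (r : Int) : tri (r + 1) = tri r + (r + 1) := by
  unfold tri
  rw [PySem.Int.floordiv_eq_ediv_of_pos (by norm_num),
      PySem.Int.floordiv_eq_ediv_of_pos (by norm_num)]
  have h : (r + 1) * (r + 1 + 1) = r * (r + 1) + (r + 1) * 2 := by ring
  rw [h, Int.add_mul_ediv_right _ _ (by norm_num : (2:Int) ≠ 0)]

-- the sum of tri' over the gaps of a list (B's second stage, abstracted)
def gS (xs : List Int) : Int :=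
  ((xs.zip xs.tail).map (fun ab => tri' (ab.2 - ab.1))).foldl (· + ·) 0

theorem foldl_add_init (l : List Int) : ∀ (a b : Int),
    l.foldl (· + ·) (a + b) = a + l.foldl (· + ·) b := by
  induction l with
  | nil => intro a b; simp
  | cons x t ih =>
    intro a b
    simp only [List.foldl_cons]
    rw [add_assoc, ih]

theorem gS_pair (x y : Int) : gS [x, y] = tri' (y - x) := by simp [gS]

theorem gS_cons (x y : Int) (l : List Int) :
    gS (x :: y :: l) = tri' (y - x) + gS (y :: l) := by
  simp only [gS, List.tail_cons, List.zip_cons_cons, List.map_cons, List.foldl_cons, zero_add]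
  have := foldl_add_init (((y :: l).zip l).map (fun ab => tri' (ab.2 - ab.1)))
    (tri' (y - x)) 0
  simpa using this

-- positions of the run breaks (B's first stage, abstracted over the up/down pattern)
def posFalse : List Bool → Int → List Int
  | [], _ => []
  | b :: bs, i => if b then posFalse bs (i + 1) else i :: posFalse bs (i + 1)

theorem posFalse_append : ∀ (bs : List Bool) (b : Bool) (i : Int),
    posFalse (bs ++ [b]) i
      = posFalse bs i ++ (if b then [] else [i + (bs.length : Int)]) := by
  intro bs
  induction bs with
  | nil => intro b i; cases b <;> simp [posFalse]
  | cons x t ih =>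
    intro b i
    cases x <;> simp [posFalse, ih b (i + 1)] <;> ring_nf

-- the run-length invariant: A's fold from (tot + tri r, r), with the breaks
-- enumerated from offset i and the open run encoded as head i - 1 - r,
-- equals tot plus B's gap sum over the break positions
theorem main_fold : ∀ (bs : List Bool) (i r tot : Int),
    (bs.foldl
      (fun (s : Int × Int) b =>
        if b then (s.1 + (s.2 + 1), s.2 + 1) else (s.1, 0)) (tot + tri r, r)).1
    = tot + gS ((i - 1 - r) :: posFalse bs i ++ [i + (bs.length : Int)]) := by
  intro bs
  induction bs with
  | nil =>
    intro i r tot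
    simp only [List.foldl_nil, posFalse, List.length_nil, Nat.cast_zero, add_zero]
    rw [show ([i - 1 - r] ++ [i] : List Int) = [i - 1 - r, i] from rfl,
        gS_pair, show i - (i - 1 - r) = r + 1 from by ring, tri'_succ]
  | cons b bs ih =>
    intro i r tot
    cases b with
    | true =>
      simp only [List.foldl_cons, posFalse, List.length_cons]
      rw [if_pos trivial, if_pos trivial]
      have h0 : tot + tri r + (r + 1) = tot + tri (r + 1) := by
        rw [tri_succ]; ring
      rw [h0, ih (i + 1) (r + 1) tot]
      push_cast
      rw [show i + 1 - 1 - (r + 1) = i - 1 - r from by ring,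
          show i + 1 + (bs.length : Int) = i + ((bs.length : Int) + 1) from by ring]
    | false =>
      simp only [List.foldl_cons, posFalse, List.length_cons]
      rw [if_neg (by simp), if_neg (by simp)]
      have h0 : (tot + tri r : Int) = (tot + tri r) + tri 0 := by rw [tri_zero]; ring
      rw [h0, ih (i + 1) 0 (tot + tri r)]
      push_cast
      simp only [List.cons_append]
      rw [gS_cons, show i - (i - 1 - r) = r + 1 from by ring, tri'_succ,
          show i + 1 - 1 - (0:Int) = i from by ring,
          show i + ((bs.length : Int) + 1) = i + 1 + (bs.length : Int) from by ring]
      ring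

-- folding over the indices of a list is folding over the list (A-side bridge, part 1)
theorem foldl_range_getD {β γ : Type} (zs : List β) (d : β) (F : γ → β → γ) :
    ∀ (init : γ),
      (List.range zs.length).foldl (fun s k => F s (zs.getD k d)) init
        = zs.foldl F init := by
  induction zs with
  | nil => intro init; simp
  | cons z zs ih =>
    intro init
    simp only [List.length_cons, List.range_succ_eq_map, List.foldl_cons,
      List.foldl_map, List.getD_cons_zero, List.getD_cons_succ]
    exact ih (F init z)

-- A's fold over indices 1..n equals the same fold over the zipped adjacent pairs
theorem foldl_range_pairs (xs : List Int) (init : Int × Int) :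
    (PySem.List.pyRange 1 (PySem.List.len xs) 1).foldl
      (fun (s : Int × Int) i =>
        if PySem.List.pyGetD xs i 0 > PySem.List.pyGetD xs (i - 1) 0 then
          (s.1 + (s.2 + 1), s.2 + 1)
        else (s.1, 0)) init
    = (xs.zip xs.tail).foldl
      (fun (s : Int × Int) pc =>
        if pc.2 > pc.1 then (s.1 + (s.2 + 1), s.2 + 1) else (s.1, 0)) init := by
  cases hxs : xs with
  | nil => simp [PySem.List.pyRange_one_eq_nil]
  | cons x t =>
    have hlen : (PySem.List.len (x :: t) - 1).toNat = t.length := by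
      simp [PySem.List.len_eq]
    have hzlen : ((x :: t).zip (x :: t).tail).length = t.length := by
      simp [List.length_zip]
    rw [PySem.List.pyRange_one, List.foldl_map, hlen,
        ← hzlen, ← foldl_range_getD ((x :: t).zip (x :: t).tail) (0, 0) _ init]
    apply PySem.List.foldl_congr_mem
    intro acc k hk
    have hk' : k < t.length := by
      have := List.mem_range.mp hk; omega
    have hzip : ((x :: t).zip (x :: t).tail).getD k (0, 0)
        = ((x :: t).getD k 0, (x :: t).getD (k + 1) 0) := by
      have hk2 : k < ((x :: t).zip (x :: t).tail).length := by omega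
      rw [List.getD_eq_getElem _ _ hk2, List.getElem_zip,
          List.getD_eq_getElem _ _ (by simp; omega),
          List.getD_eq_getElem _ _ (by simp; omega)]
      simp [List.getElem_cons_succ]
    have h1 : PySem.List.pyGetD (x :: t) (1 + (k : Int)) 0 = (x :: t).getD (k + 1) 0 := by
      have : (1 + (k : Int)) = ((k + 1 : Nat) : Int) := by push_cast; ring
      rw [this, PySem.List.pyGetD_natCast]
    have h2 : PySem.List.pyGetD (x :: t) (1 + (k : Int) - 1) 0 = (x :: t).getD k 0 := by
      have : (1 + (k : Int) - 1) = ((k : Nat) : Int) := by omega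
      rw [this, PySem.List.pyGetD_natCast]
    rw [h1, h2, hzip]

-- B's filter of break indices equals posFalse over the up/down pattern
theorem filter_range (x : Int) (t : List Int) : ∀ (m : Nat), m ≤ t.length →
    (PySem.List.pyRange 1 ((m : Int) + 1) 1).filter
      (fun i => decide (PySem.List.pyGetD (x :: t) i 0 ≤ PySem.List.pyGetD (x :: t) (i - 1) 0))
    = posFalse (((((x :: t).zip t).take m)).map (fun p => decide (p.2 > p.1))) 1 := by
  intro m
  induction m with
  | zero =>
    intro _
    simp [PySem.List.pyRange_one_eq_nil, posFalse]
  | succ m ih =>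
    intro hm
    have hm' : m ≤ t.length := by omega
    have hm2 : m < t.length := by omega
    have hma : m < (x :: t).length := by simp; omega
    have hmz : m < ((x :: t).zip t).length := by simp [List.length_zip]; omega
    have hsplit : PySem.List.pyRange 1 ((Nat.succ m : Int) + 1) 1
        = PySem.List.pyRange 1 ((m : Int) + 1) 1 ++ [(m : Int) + 1] := by
      have := PySem.List.pyRange_one_succ_right (a := 1) (b := (m : Int) + 1) (by omega)
      rw [show ((Nat.succ m : Int) + 1) = ((m : Int) + 1) + 1 from by push_cast; ring]
      exact this
    rw [hsplit, List.filter_append, ih hm']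
    have htake : ((x :: t).zip t).take (m + 1)
        = ((x :: t).zip t).take m ++ [((x :: t).zip t)[m]] := by
      rw [List.take_add_one, List.getElem?_eq_getElem hmz]
      rfl
    have hlen2 : (((((x :: t).zip t).take m)).map (fun p => decide (p.2 > p.1))).length = m := by
      simp [List.length_take, List.length_zip]
      omega
    rw [htake, List.map_append, List.map_singleton, posFalse_append, hlen2]
    congr 1
    have hgl : PySem.List.pyGetD (x :: t) ((m : Int) + 1) 0 = t[m]'hm2 := by
      rw [show ((m : Int) + 1) = ((m + 1 : Nat) : Int) from by push_cast; ring,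
          PySem.List.pyGetD_natCast, List.getD_eq_getElem _ _ (by simp; omega)]
      simp
    have hgr : PySem.List.pyGetD (x :: t) ((m : Int) + 1 - 1) 0 = (x :: t)[m]'hma := by
      rw [show ((m : Int) + 1 - 1) = ((m : Nat) : Int) from by ring,
          PySem.List.pyGetD_natCast, List.getD_eq_getElem _ _ hma]
    rw [List.filter_singleton]
    simp only [hgl, hgr, List.getElem_zip]
    by_cases hc : (x :: t)[m]'hma < t[m]'hm2
    · simp [hc, not_le.mpr hc]
    · simp [hc, not_lt.mp hc, add_comm]

-- ===== VERDICT (by name: the statement is the Claim_ definition above) =====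
theorem f_spec : Claim_equal_f := by
  intro nums _
  unfold Spec_f
  cases hn : nums with
  | nil => decide
  | cons x t =>
    -- A side: fold over indices → fold over pairs → fold over the Bool pattern
    unfold f
    rw [foldl_range_pairs]
    have htail : (x :: t).tail = t := rfl
    rw [htail]
    set ps := (x :: t).zip t with hps
    set bs := ps.map (fun p => decide (p.2 > p.1)) with hbs
    have hA : ps.foldl
        (fun (s : Int × Int) pc =>
          if pc.2 > pc.1 then (s.1 + (s.2 + 1), s.2 + 1) else (s.1, 0)) (0, 0)
        = bs.foldl
        (fun (s : Int × Int) b =>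
          if b then (s.1 + (s.2 + 1), s.2 + 1) else (s.1, 0)) (0, 0) := by
      rw [hbs, List.foldl_map]
      apply PySem.List.foldl_congr_mem
      intro acc p _
      by_cases h : p.2 > p.1 <;> simp [h]
    rw [hA]
    have hinit : ((0 : Int), (0 : Int)) = (0 + tri 0, 0) := by rw [tri_zero]; norm_num
    rw [hinit, main_fold bs 1 0 0]
    -- B side
    simp only [f_alt, PySem.List.slice_from_one]
    have hlenlen : PySem.List.len (x :: t) = (t.length : Int) + 1 := by
      simp [PySem.List.len_eq]
    have hfil := filter_range x t t.length (le_refl _)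
    have htakeall : ((x :: t).zip t).take t.length = (x :: t).zip t := by
      apply List.take_of_length_le
      simp [List.length_zip]
    rw [htakeall] at hfil
    rw [hlenlen, hfil, ← hps, ← hbs]
    have hbslen : (bs.length : Int) = (t.length : Int) := by
      simp [hbs, hps, List.length_zip]
    rw [← hbslen]
    have hform : ∀ (br : List Int),
        ((br.zip br.tail).map
          (fun ab => PySem.Int.floordiv ((ab.2 - ab.1) * (ab.2 - ab.1 - 1)) 2)).foldl (· + ·) 0
        = gS br := by
      intro br; simp [gS, tri']
    rw [hform]
    rw [show (1:Int) - 1 - 0 = 0 from by norm_num]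
    rw [show ((1:Int) + (bs.length : Int)) = ((bs.length : Int) + 1) from by ring]
    simp
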